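-- pv_equiv track=rewrite | github.com/Vishvam10/CP-Problems | LeetCode/2389/main.py | answerQueries
-- ===== SOURCE A (Python) =====
-- from typing import List
--
-- def answerQueries(arr: List[int], queries: List[int]) -> List[int]:
--     arr.sort()
--     ans = []
--     for target in queries:
--         temp = 0
--         count = 0
--         for val in arr:
--             if (temp + val <= target):
--                 temp += val
--                 count += 1
--             else:
--                 break
--         ans.append(count)
--
--     return ans
-- ===== SOURCE B (Python) =====
-- def answerQueries(arr, queries):
--     # Sort once (in place, like A), take running-max of prefix sums (nondecreasing),
--     # then answer each query by binary search instead of a linear scan.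
--     arr.sort()
--     run = []
--     s = 0
--     hi_so_far = None
--     for v in arr:
--         s += v
--         if hi_so_far is None or s > hi_so_far:
--             hi_so_far = s
--         run.append(hi_so_far)
--     n = len(run)
--     ans = []
--     for q in queries:
--         lo, hi = 0, n
--         while lo < hi:
--             mid = (lo + hi) // 2
--             if q < run[mid]:
--                 hi = mid
--             else:
--                 lo = mid + 1
--         ans.append(lo)
--     return ans
-- ===== Notes on version B (the rewrite author's own statement) =====
-- stated objective: faster
-- what changed: A rescans the sorted array greedily for every query (O(Q*N)); B precomputes the running maximum of the prefix sums once and answers each query with a hand-written binary search on that nondecreasing list (O((N+Q) log N)).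
import Mathlib
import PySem

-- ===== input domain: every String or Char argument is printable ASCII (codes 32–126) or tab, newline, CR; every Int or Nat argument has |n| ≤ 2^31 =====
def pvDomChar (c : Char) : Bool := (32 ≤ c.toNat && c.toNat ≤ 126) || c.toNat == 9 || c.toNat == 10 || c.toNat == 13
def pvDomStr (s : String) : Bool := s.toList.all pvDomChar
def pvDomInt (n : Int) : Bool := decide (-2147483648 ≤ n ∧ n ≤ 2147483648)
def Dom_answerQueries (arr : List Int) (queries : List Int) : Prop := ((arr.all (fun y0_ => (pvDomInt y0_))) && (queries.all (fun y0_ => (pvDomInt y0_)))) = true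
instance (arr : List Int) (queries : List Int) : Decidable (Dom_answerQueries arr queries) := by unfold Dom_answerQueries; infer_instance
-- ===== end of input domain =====

-- B replaces A's per-query linear greedy scan by one running-max-of-prefix-sums pass plus a
-- binary search per query (faster). Both A and B sort `arr` in place in Python; the
-- equivalence proved here is about the return value (the mutation is identical anyway).

-- ===== PORT A =====
-- inner `for val in arr` loop with break, carrying (temp, count)
def aLoop (target : Int) : List Int → Int → Int → Int
  | [], _, count => count
  | v :: rest, temp, count =>
      if temp + v ≤ target then aLoop target rest (temp + v) (count + 1) else count

def answerQueries (arr : List Int) (queries : List Int) : List Int :=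
  let arr := PySem.List.sorted arr (fun x => x) false
  queries.foldl (fun ans target => ans ++ [aLoop target arr 0 0]) []

-- ===== PORT B =====
-- the `for v in arr` loop of Source B: running sum s, running max hi_so_far (None initially)
def bRun : List Int → Int → Option Int → List Int
  | [], _, _ => []
  | v :: rest, s, none => (s + v) :: bRun rest (s + v) (some (s + v))
  | v :: rest, s, some m0 =>
      (if s + v > m0 then s + v else m0) ::
        bRun rest (s + v) (some (if s + v > m0 then s + v else m0))

-- the hand-written `while lo < hi` binary search of Source B
def bSearch (run : List Int) (q : Int) (lo hi : Nat) : Nat :=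
  if lo < hi then
    if q < run.getD ((lo + hi) / 2) 0 then bSearch run q lo ((lo + hi) / 2)
    else bSearch run q ((lo + hi) / 2 + 1) hi
  else lo
termination_by hi - lo
decreasing_by all_goals omega

def answerQueries_alt (arr : List Int) (queries : List Int) : List Int :=
  let arr := PySem.List.sorted arr (fun x => x) false
  let run := bRun arr 0 none
  queries.foldl (fun ans q => ans ++ [(bSearch run q 0 run.length : Int)]) []

-- ===== PRECONDITION & SPEC =====
def Spec_answerQueries (arr : List Int) (queries : List Int) (out : List Int) : Prop := out = answerQueries_alt arr queries
instance (arr : List Int) (queries : List Int) (out : List Int) : Decidable (Spec_answerQueries arr queries out) := by unfold Spec_answerQueries; infer_instance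

-- ===== CLAIM (what is proved, stated in full; the proofs are below) =====
def Claim_equal_answerQueries : Prop := ∀ (arr : List Int) (queries : List Int), Dom_answerQueries arr queries → Spec_answerQueries arr queries (answerQueries arr queries)

-- ===== LEMMAS AND PROOFS =====

-- Nat-valued version of A's inner count
def cN (t : Int) : List Int → Int → Nat
  | [], _ => 0
  | v :: rest, temp => if temp + v ≤ t then cN t rest (temp + v) + 1 else 0

theorem aLoop_eq (t : Int) : ∀ (xs : List Int) (temp c : Int),
    aLoop t xs temp c = c + (cN t xs temp : Int) := by
  intro xs
  induction xs with
  | nil => intro temp c; simp [aLoop, cN]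
  | cons v rest ih =>
      intro temp c
      simp only [aLoop, cN]
      by_cases h : temp + v ≤ t
      · simp [h, ih]; ring
      · simp [h]

theorem foldl_append_map (f : Int → Int) : ∀ (qs : List Int) (acc : List Int),
    qs.foldl (fun ans t => ans ++ [f t]) acc = acc ++ qs.map f := by
  intro qs
  induction qs with
  | nil => intro acc; simp
  | cons q rest ih => intro acc; simp [List.foldl, ih]

-- the running-max list is chain-nondecreasing, and bounded below by its seed
theorem bRun_chain : ∀ (xs : List Int) (s m0 : Int),
    List.IsChain (· ≤ ·) (m0 :: bRun xs s (some m0)) := by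
  intro xs
  induction xs with
  | nil => intro s m0; simp only [bRun]; exact List.IsChain.singleton _
  | cons v rest ih =>
      intro s m0
      simp only [bRun]
      rw [List.isChain_cons_cons]
      constructor
      · split <;> omega
      · exact ih (s + v) _

theorem bRun_chain_top (xs : List Int) : List.IsChain (· ≤ ·) (bRun xs 0 none) := by
  cases xs with
  | nil => exact List.IsChain.nil
  | cons v rest => simpa [bRun] using bRun_chain rest (0 + v) (0 + v)

theorem bRun_mono (xs : List Int) :
    ∀ i j (hi : i < (bRun xs 0 none).length) (hj : j < (bRun xs 0 none).length),
      i ≤ j → (bRun xs 0 none)[i] ≤ (bRun xs 0 none)[j] := by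
  intro i j hi hj hij
  rcases Nat.lt_or_ge i j with h | h
  · exact (List.pairwise_iff_getElem.mp
      (List.isChain_iff_pairwise.mp (bRun_chain_top xs))) i j hi hj h
  · have : i = j := by omega
    subst this; exact le_refl _

-- characterization of A's greedy count against the running-max list (seed carried)
theorem char_some (t : Int) : ∀ (xs : List Int) (temp m : Int), m ≤ t →
    cN t xs temp ≤ (bRun xs temp (some m)).length ∧
    (∀ i (h : i < (bRun xs temp (some m)).length), i < cN t xs temp →
        (bRun xs temp (some m))[i] ≤ t) ∧
    (∀ h : cN t xs temp < (bRun xs temp (some m)).length,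
        t < (bRun xs temp (some m))[cN t xs temp]) := by
  intro xs
  induction xs with
  | nil => intro temp m hm; simp [bRun, cN]
  | cons v rest ih =>
      intro temp m hm
      by_cases h : temp + v ≤ t
      · have hm' : (if temp + v > m then temp + v else m) ≤ t := by split <;> omega
        obtain ⟨ih1, ih2, ih3⟩ := ih (temp + v) _ hm'
        refine ⟨?_, ?_, ?_⟩
        · simp only [bRun, cN, h, if_true, List.length_cons]; omega
        · intro i hilen hic
          simp only [bRun, cN, h, if_true] at hic ⊢
          cases i with
          | zero => simpa using hm'
          | succ j =>
              simp only [List.getElem_cons_succ]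
              exact ih2 j (by simp only [bRun, List.length_cons] at hilen; omega) (by omega)
        · intro hlt
          simp only [bRun, cN, h, if_true, List.length_cons] at hlt ⊢
          simp only [List.getElem_cons_succ]
          exact ih3 (by omega)
      · refine ⟨by simp [cN, h], by simp [cN, h], ?_⟩
        intro hlt
        simp only [bRun, cN, h, if_false] at hlt ⊢
        simp only [List.getElem_cons_zero]
        split <;> omega

theorem char_top (t : Int) (xs : List Int) :
    cN t xs 0 ≤ (bRun xs 0 none).length ∧
    (∀ i (h : i < (bRun xs 0 none).length), i < cN t xs 0 → (bRun xs 0 none)[i] ≤ t) ∧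
    (∀ h : cN t xs 0 < (bRun xs 0 none).length, t < (bRun xs 0 none)[cN t xs 0]) := by
  cases xs with
  | nil => simp [bRun, cN]
  | cons v rest =>
      by_cases h : v ≤ t
      · obtain ⟨ih1, ih2, ih3⟩ := char_some t rest (0 + v) (0 + v) (by omega)
        simp only [zero_add] at ih1 ih2 ih3
        refine ⟨?_, ?_, ?_⟩
        · simp only [bRun, cN, zero_add, h, if_true, List.length_cons]
          omega
        · intro i hilen hic
          simp only [bRun, cN, zero_add, h, if_true, List.length_cons] at hilen hic ⊢
          cases i with
          | zero => simp only [List.getElem_cons_zero]; omega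
          | succ j =>
              simp only [List.getElem_cons_succ]
              exact ih2 j (by omega) (by omega)
        · intro hlt
          simp only [bRun, cN, zero_add, h, if_true, List.length_cons] at hlt ⊢
          simp only [List.getElem_cons_succ]
          exact ih3 (by omega)
      · refine ⟨?_, ?_, ?_⟩
        · simp only [cN, zero_add, h, if_false]; omega
        · intro i hilen hic; simp only [cN, zero_add, h, if_false] at hic; omega
        · intro hlt
          simp only [bRun, cN, zero_add, h, if_false] at hlt ⊢
          simp only [List.getElem_cons_zero]
          omega

-- binary-search invariant: bSearch finds the unique c characterized above
theorem bSearch_eq (L : List Int) (t : Int) (c : Nat)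
    (mono : ∀ i j (hi : i < L.length) (hj : j < L.length), i ≤ j → L[i] ≤ L[j])
    (hc : c ≤ L.length)
    (h1 : ∀ i (h : i < L.length), i < c → L[i] ≤ t)
    (h2 : ∀ h : c < L.length, t < L[c]) :
    ∀ (d lo hi : Nat), hi - lo ≤ d → lo ≤ hi → hi ≤ L.length →
      (∀ i (h : i < L.length), i < lo → L[i] ≤ t) →
      (∀ i (h : i < L.length), hi ≤ i → t < L[i]) →
      bSearch L t lo hi = c := by
  intro d
  induction d with
  | zero =>
      intro lo hi hd hlohi hhil inv1 inv2
      have heq : lo = hi := by omega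
      rw [bSearch]
      simp only [heq, lt_irrefl, if_false]
      -- show hi = c
      by_contra hne
      rcases Nat.lt_or_ge hi c with hlt | hge
      · have hhiLen : hi < L.length := by omega
        have := inv2 hi hhiLen (le_refl _)
        have := h1 hi hhiLen hlt
        omega
      · have hclo : c < hi := by omega
        have hcLen : c < L.length := by omega
        have := inv1 c hcLen (by omega)
        have := h2 hcLen
        omega
  | succ d ih =>
      intro lo hi hd hlohi hhil inv1 inv2
      rw [bSearch]
      by_cases hlt : lo < hi
      · simp only [hlt, if_true]
        have hmidlt : (lo + hi) / 2 < hi := by omega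
        have hmidge : lo ≤ (lo + hi) / 2 := by omega
        have hmidLen : (lo + hi) / 2 < L.length := by omega
        rw [List.getD_eq_getElem L 0 hmidLen]
        by_cases hq : t < L[(lo + hi) / 2]
        · simp only [hq, if_true]
          exact ih lo ((lo + hi) / 2) (by omega) (by omega) (by omega) inv1
            (fun i h hge => lt_of_lt_of_le hq (mono _ i hmidLen h hge))
        · simp only [hq, if_false]
          exact ih ((lo + hi) / 2 + 1) hi (by omega) (by omega) hhil
            (fun i h hle => le_trans (mono i _ h hmidLen (by omega)) (by omega)) inv2
      · simp only [hlt, if_false]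
        have heq : lo = hi := by omega
        by_contra hne
        rcases Nat.lt_or_ge hi c with hlt2 | hge
        · have hhiLen : hi < L.length := by omega
          have := inv2 hi hhiLen (le_refl _)
          have := h1 hi hhiLen (by omega)
          omega
        · have hclo : c < hi := by omega
          have hcLen : c < L.length := by omega
          have := inv1 c hcLen (by omega)
          have := h2 hcLen
          omega

theorem per_query (t : Int) (s : List Int) :
    bSearch (bRun s 0 none) t 0 (bRun s 0 none).length = cN t s 0 := by
  obtain ⟨hc, h1, h2⟩ := char_top t s
  exact bSearch_eq (bRun s 0 none) t (cN t s 0) (bRun_mono s) hc h1 h2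
    (bRun s 0 none).length 0 (bRun s 0 none).length (by omega) (by omega) (le_refl _)
    (by omega) (by omega)

-- ===== VERDICT (by name: the statement is the Claim_ definition above) =====
theorem answerQueries_spec : Claim_equal_answerQueries := by
  intro arr queries _
  unfold Spec_answerQueries answerQueries answerQueries_alt
  simp only [foldl_append_map]
  apply List.map_congr_left
  intro t _
  rw [aLoop_eq, per_query]
  simp
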